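-- pv_equiv track=rewrite | github.com/jose-retamalcito/ruuf-tarea-dev | main.py | pack_panels_in_roof
-- ===== SOURCE A (Python) =====
-- def pack_panels_in_roof(panel_long_side: int, panel_short_side: int, roof_long_side: int, roof_short_side: int) -> int:
--     how_many_fit_long_side = roof_long_side // panel_long_side
--     how_many_fit_short_side = roof_short_side // panel_short_side
--
--     remaining_long = roof_long_side - how_many_fit_long_side * panel_long_side
--
--     if remaining_long < panel_short_side or roof_short_side < panel_long_side:
--         return how_many_fit_long_side * how_many_fit_short_side
--
--     remaining_space_panels = pack_panels_in_roof(panel_long_side, panel_short_side, roof_short_side, remaining_long)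
--
--     total_panels = how_many_fit_long_side * how_many_fit_short_side + remaining_space_panels
--
--     return total_panels
-- ===== SOURCE B (Python) =====
-- def pack_panels_in_roof(panel_long_side: int, panel_short_side: int, roof_long_side: int, roof_short_side: int) -> int:
--     base = (roof_long_side // panel_long_side) * (roof_short_side // panel_short_side)
--     rem = roof_long_side % panel_long_side
--     if rem < panel_short_side or roof_short_side < panel_long_side:
--         return base
--     return base + (roof_short_side // panel_long_side) * (rem // panel_short_side)
-- ===== Notes on version B (the rewrite author's own statement) =====
-- stated objective: simpler
-- what changed: Replaces A's recursion by a straight-line closed form: under nonzero panel sides the recursion is at most two levels deep (the second remainder is below the long panel side), so B computes both levels directly with // and % and no recursion or loop.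
-- outside the precondition, e.g. on pack_panels_in_roof(-5, -3, 1, 6): A returns 2, B returns 2; on pack_panels_in_roof(-5, -3, 100, 100): A raises RecursionError, B returns 680
import Mathlib
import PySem

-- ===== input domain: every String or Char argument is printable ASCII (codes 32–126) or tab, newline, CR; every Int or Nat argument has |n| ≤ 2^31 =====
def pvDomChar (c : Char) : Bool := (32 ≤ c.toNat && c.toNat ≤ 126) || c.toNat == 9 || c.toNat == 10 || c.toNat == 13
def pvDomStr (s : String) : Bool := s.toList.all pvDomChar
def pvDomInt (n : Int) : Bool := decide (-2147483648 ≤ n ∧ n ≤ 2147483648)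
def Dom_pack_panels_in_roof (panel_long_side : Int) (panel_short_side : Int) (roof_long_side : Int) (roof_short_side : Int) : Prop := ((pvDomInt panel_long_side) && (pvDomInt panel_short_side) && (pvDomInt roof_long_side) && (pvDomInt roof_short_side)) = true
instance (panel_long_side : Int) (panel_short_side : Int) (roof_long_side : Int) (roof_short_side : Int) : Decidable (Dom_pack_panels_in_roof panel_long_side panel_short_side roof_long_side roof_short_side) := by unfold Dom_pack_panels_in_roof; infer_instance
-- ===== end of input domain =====

-- B replaces A's recursion by straight-line closed-form arithmetic (the recursion is at most two levels deep on the admitted domain); objective: simpler.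


-- ===== PORT A =====
-- A's recursion, made total with a fuel parameter; under Pre_ the recursion depth
-- is at most 2, so the fuel 4 supplied at the top level is never exhausted.
def packRec (fuel : Nat) (panel_long_side panel_short_side roof_long_side roof_short_side : Int) : Int :=
  match fuel with
  | 0 => 0
  | fuel + 1 =>
    let how_many_fit_long_side := PySem.Int.floordiv roof_long_side panel_long_side
    let how_many_fit_short_side := PySem.Int.floordiv roof_short_side panel_short_side
    let remaining_long := roof_long_side - how_many_fit_long_side * panel_long_side
    if remaining_long < panel_short_side ∨ roof_short_side < panel_long_side then
      how_many_fit_long_side * how_many_fit_short_side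
    else
      let remaining_space_panels := packRec fuel panel_long_side panel_short_side roof_short_side remaining_long
      how_many_fit_long_side * how_many_fit_short_side + remaining_space_panels

def pack_panels_in_roof (panel_long_side : Int) (panel_short_side : Int) (roof_long_side : Int) (roof_short_side : Int) : Int :=
  packRec 4 panel_long_side panel_short_side roof_long_side roof_short_side

-- ===== PORT B =====
-- B: straight-line closed form, no recursion or loop.
def pack_panels_in_roof_alt (panel_long_side : Int) (panel_short_side : Int) (roof_long_side : Int) (roof_short_side : Int) : Int :=
  let base := PySem.Int.floordiv roof_long_side panel_long_side * PySem.Int.floordiv roof_short_side panel_short_side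
  let rem := PySem.Int.mod roof_long_side panel_long_side
  if rem < panel_short_side ∨ roof_short_side < panel_long_side then base
  else base + PySem.Int.floordiv roof_short_side panel_long_side * PySem.Int.floordiv rem panel_short_side

-- ===== PRECONDITION & SPEC =====
-- Pre_ excludes zero panel sides (Python A raises ZeroDivisionError) and the
-- nonsensical case in which BOTH panel sides are negative, where A's recursion
-- usually exceeds Python's recursion limit (RecursionError).
def Pre_pack_panels_in_roof (panel_long_side : Int) (panel_short_side : Int) (roof_long_side : Int) (roof_short_side : Int) : Prop :=
  panel_long_side ≠ 0 ∧ panel_short_side ≠ 0 ∧ (0 < panel_long_side ∨ 0 < panel_short_side)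
instance (panel_long_side : Int) (panel_short_side : Int) (roof_long_side : Int) (roof_short_side : Int) : Decidable (Pre_pack_panels_in_roof panel_long_side panel_short_side roof_long_side roof_short_side) := by unfold Pre_pack_panels_in_roof; infer_instance

def pvWitness_pack_panels_in_roof : Int × Int × Int × Int := (2, 1, 5, 4)

def Spec_pack_panels_in_roof (panel_long_side : Int) (panel_short_side : Int) (roof_long_side : Int) (roof_short_side : Int) (out : Int) : Prop := out = pack_panels_in_roof_alt panel_long_side panel_short_side roof_long_side roof_short_side
instance (panel_long_side : Int) (panel_short_side : Int) (roof_long_side : Int) (roof_short_side : Int) (out : Int) : Decidable (Spec_pack_panels_in_roof panel_long_side panel_short_side roof_long_side roof_short_side out) := by unfold Spec_pack_panels_in_roof; infer_instance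

-- ===== CLAIM =====
def Claim_equal_pack_panels_in_roof : Prop := ∀ (panel_long_side : Int) (panel_short_side : Int) (roof_long_side : Int) (roof_short_side : Int), Dom_pack_panels_in_roof panel_long_side panel_short_side roof_long_side roof_short_side → Pre_pack_panels_in_roof panel_long_side panel_short_side roof_long_side roof_short_side → Spec_pack_panels_in_roof panel_long_side panel_short_side roof_long_side roof_short_side (pack_panels_in_roof panel_long_side panel_short_side roof_long_side roof_short_side)

-- ===== LEMMAS AND PROOFS =====

-- the remainder computed by both programs is PySem.Int.mod
theorem rem_eq_mod (a b : Int) : a - PySem.Int.floordiv a b * b = PySem.Int.mod a b := by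
  have h := PySem.Int.floordiv_mul_add_mod a b
  omega

-- ===== VERDICT =====
theorem pack_panels_in_roof_spec : Claim_equal_pack_panels_in_roof := by
  intro pl ps rl rs _ hpre
  obtain ⟨hpl, hps, hpos⟩ := hpre
  unfold Spec_pack_panels_in_roof pack_panels_in_roof pack_panels_in_roof_alt
  simp only [packRec]
  have hrem1 := rem_eq_mod rl pl
  by_cases h1 : rl - PySem.Int.floordiv rl pl * pl < ps ∨ rs < pl
  · rw [if_pos h1, if_pos (by omega : PySem.Int.mod rl pl < ps ∨ rs < pl)]
  · rw [if_neg h1, if_neg (by omega : ¬ (PySem.Int.mod rl pl < ps ∨ rs < pl))]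
    -- first guard failed; with Pre_ the panel long side must be positive
    have hplpos : 0 < pl := by
      rcases hpos with h | h
      · exact h
      · rcases lt_trichotomy pl 0 with hneg | hz | hp
        · exfalso
          have hb := PySem.Int.mod_neg_bounds (a := rl) hneg
          exact h1 (Or.inl (by omega))
        · exact absurd hz hpl
        · exact hp
    -- second level: the new short side (= first remainder) is < pl, so its guard fires
    have hlt : rl - PySem.Int.floordiv rl pl * pl < pl := by
      have := PySem.Int.mod_lt (a := rl) hplpos
      omega
    rw [if_pos (Or.inr hlt)]
    rw [hrem1]
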